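-- pv_equiv track=rewrite | github.com/flutterHao/flutter_common_utils | tool_swagger/gen_dart_cmds.py | basename_to_class_name
-- ===== SOURCE A (Python) =====
-- def basename_to_class_name(name):
--     name = name.split('.')[0]
--     name = name.replace('-', '_')
--     while name.find('__') >= 0:
--         name = name.replace('__', '_')
--         pass
--     name_strs = name.split('_')
--     name_strs = list(map(lambda x:x[0].upper() + x[1:] , name_strs))
--     name = ''.join(name_strs)
--     return name
--     pass
-- ===== SOURCE B (Python) =====
-- def basename_to_class_name(name):
--     out = []
--     start = True
--     for ch in name:
--         if ch == '.':
--             break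
--         if ch in '-_':
--             start = True
--         elif start:
--             out.append(ch.upper())
--             start = False
--         else:
--             out.append(ch)
--     return ''.join(out)
-- ===== Notes on version B (the rewrite author's own statement) =====
-- stated objective: alternative
-- what changed: replaces A's multi-pass pipeline (dash replace, a while loop repeatedly collapsing '__', split on '_', capitalize segments, join) by one left-to-right character scan that cuts at the first '.' and uppercases the char after each separator run
-- outside the precondition, e.g. on basename_to_class_name('.'): A raises IndexError, B returns ''; on basename_to_class_name('-'): A raises IndexError, B returns ''; on basename_to_class_name('_'): A raises IndexError, B returns ''
import Mathlib
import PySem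

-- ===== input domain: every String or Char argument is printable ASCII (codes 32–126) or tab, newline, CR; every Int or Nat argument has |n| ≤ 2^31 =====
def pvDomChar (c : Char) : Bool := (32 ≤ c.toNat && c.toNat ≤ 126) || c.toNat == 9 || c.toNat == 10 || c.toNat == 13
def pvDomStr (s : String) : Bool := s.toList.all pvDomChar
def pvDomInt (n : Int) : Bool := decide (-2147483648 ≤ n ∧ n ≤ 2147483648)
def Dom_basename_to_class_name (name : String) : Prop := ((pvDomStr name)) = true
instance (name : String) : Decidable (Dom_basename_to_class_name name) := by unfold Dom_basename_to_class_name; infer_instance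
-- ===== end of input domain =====

-- B replaces A's multi-pass pipeline (dash replace, while-loop collapsing '__', split, capitalize,
-- join) by a single left-to-right character scan; equal return values on Pre_ (where A does not raise).

-- ===== PORT A =====

-- structural model of one pass of name.replace('__', '_'); used only to justify
-- termination of the while loop below (cited by name in its decreasing_by).
def pvR2 : List Char → List Char
  | [] => []
  | [c] => [c]
  | c :: d :: t => if c = '_' ∧ d = '_' then '_' :: pvR2 t else c :: pvR2 (d :: t)

theorem pvR2_length_le (s : List Char) : (pvR2 s).length ≤ s.length := by
  fun_induction pvR2 s with
  | case1 => simp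
  | case2 => simp
  | case3 c d t h ih => simp only [List.length_cons]; omega
  | case4 c d t h ih => simp only [List.length_cons] at *; omega

theorem pvR2_eq (s : List Char) :
    PySem.Chars.replace s ['_', '_'] ['_'] = pvR2 s := by
  show (if (['_', '_'] : List Char).isEmpty = true then _ else PySem.Chars.replace.go ['_','_'] ['_'] s.length s []) = _
  rw [if_neg (by decide)]
  suffices h : ∀ fuel (l acc : List Char), l.length ≤ fuel →
      PySem.Chars.replace.go ['_','_'] ['_'] fuel l acc = acc.reverse ++ pvR2 l by
    simpa using h s.length s [] le_rfl
  intro fuel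
  induction fuel with
  | zero =>
    intro l acc h
    have : l = [] := List.length_eq_zero_iff.mp (by omega)
    subst this
    simp [PySem.Chars.replace.go, pvR2]
  | succ n ih =>
    intro l acc h
    match l with
    | [] => simp [PySem.Chars.replace.go, pvR2]
    | c :: t =>
      rw [PySem.Chars.replace.go]
      by_cases hp : (['_','_'] : List Char).isPrefixOf (c :: t) = true
      · obtain ⟨d, u, rfl⟩ : ∃ d u, t = d :: u := by
          match t with
          | [] => simp [List.isPrefixOf] at hp
          | d :: u => exact ⟨d, u, rfl⟩
        have hcd : c = '_' ∧ d = '_' := by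
          simp [List.isPrefixOf] at hp
          exact ⟨hp.1.symm, hp.2.symm⟩
        rw [if_pos hp]
        have hdrop : List.drop (['_','_'] : List Char).length (c :: d :: u) = u := by simp
        rw [hdrop, ih u (['_'].reverse ++ acc) (by simp at h ⊢; omega)]
        simp [pvR2, hcd.1, hcd.2]
      · rw [if_neg hp]
        rw [ih t (c :: acc) (by simp at h ⊢; omega)]
        have hr : pvR2 (c :: t) = c :: pvR2 t := by
          match t with
          | [] => simp [pvR2]
          | d :: u =>
            have : ¬ (c = '_' ∧ d = '_') := by
              rintro ⟨rfl, rfl⟩; simp [List.isPrefixOf] at hp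
            simp [pvR2, this]
        rw [hr]; simp

theorem pvR2_length_lt (s : List Char) (h : ['_', '_'] <:+: s) :
    (pvR2 s).length < s.length := by
  fun_induction pvR2 s with
  | case1 => simp at h
  | case2 c => have := h.length_le; simp at this
  | case3 c d t hc ih =>
    simp only [List.length_cons]
    have := pvR2_length_le t; omega
  | case4 c d t hc ih =>
    have h2 : ['_', '_'] <:+: d :: t := by
      rcases List.infix_cons_iff.mp h with hpre | hinf
      · exfalso
        obtain ⟨u, hu⟩ := hpre
        simp only [List.cons_append, List.nil_append, List.cons.injEq] at hu
        exact hc ⟨hu.1.symm, hu.2.1.symm⟩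
      · exact hinf
    have := ih h2
    simp only [List.length_cons] at this ⊢
    omega

-- the while loop of A: repeat name = name.replace('__','_') while name.find('__') >= 0
def pvAWhile (s : List Char) : List Char :=
  if 0 ≤ PySem.Chars.find s ['_', '_'] then pvAWhile (PySem.Chars.replace s ['_', '_'] ['_']) else s
termination_by s.length
decreasing_by
  rw [pvR2_eq]
  exact pvR2_length_lt s ((PySem.Chars.find_ne_neg_one_iff s ['_', '_']).mp (by omega))

-- the lambda in A: x[0].upper() + x[1:]
def pvCap (x : List Char) : List Char :=
  (match PySem.List.pyGet? x 0 with
   | some c => PySem.Chars.upper [c]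
   | none => []) ++ PySem.Chars.slice x (some 1) none

def basename_to_class_name (name : String) : String :=
  -- name = name.split('.')[0]
  let s0 := PySem.Chars.splitOn name.toList ['.']
  let s1 := (PySem.List.pyGet? s0 0).getD []
  -- name = name.replace('-', '_')
  let s2 := PySem.Chars.replace s1 ['-'] ['_']
  -- while name.find('__') >= 0: name = name.replace('__', '_')
  let s3 := pvAWhile s2
  -- name_strs = name.split('_'); map the lambda; ''.join
  let parts := PySem.Chars.splitOn s3 ['_']
  String.ofList (PySem.Chars.join [] (parts.map pvCap))

-- ===== PORT B =====
def pvAltGo : List Char → Bool → List Char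
  | [], _ => []
  | c :: t, start =>
    if c = '.' then []
    else if c = '-' ∨ c = '_' then pvAltGo t true
    else if start then PySem.Chars.upperChar c :: pvAltGo t false
    else c :: pvAltGo t false

def basename_to_class_name_alt (name : String) : String :=
  String.ofList (pvAltGo name.toList true)

-- ===== PRECONDITION & SPEC =====
-- Pre_ excludes exactly the inputs on which Python A raises IndexError: basename (the part of
-- name before the first '.') empty, or starting or ending with '-' or '_' (an empty split
-- segment reaches x[0] there).
def Pre_basename_to_class_name (name : String) : Prop :=
  let base := name.toList.takeWhile (· ≠ '.')
  base ≠ [] ∧ base.head? ≠ some '-' ∧ base.head? ≠ some '_' ∧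
    base.getLast? ≠ some '-' ∧ base.getLast? ≠ some '_'
instance (name : String) : Decidable (Pre_basename_to_class_name name) := by unfold Pre_basename_to_class_name; infer_instance

def pvWitness_basename_to_class_name : String := "my-file__name.dart"

def Spec_basename_to_class_name (name : String) (out : String) : Prop := out = basename_to_class_name_alt name
instance (name : String) (out : String) : Decidable (Spec_basename_to_class_name name out) := by unfold Spec_basename_to_class_name; infer_instance

-- ===== CLAIM (what is proved, stated in full; the proofs are below) =====
def Claim_equal_basename_to_class_name : Prop := ∀ (name : String), Dom_basename_to_class_name name → Pre_basename_to_class_name name → Spec_basename_to_class_name name (basename_to_class_name name)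

-- ===== LEMMAS AND PROOFS =====

-- name.replace('-', '_') is a character map
def pvPhi (c : Char) : Char := if c = '-' then '_' else c

theorem pvRepl1_eq (s : List Char) :
    PySem.Chars.replace s ['-'] ['_'] = s.map pvPhi := by
  show (if (['-'] : List Char).isEmpty = true then _ else PySem.Chars.replace.go ['-'] ['_'] s.length s []) = _
  rw [if_neg (by decide)]
  suffices h : ∀ fuel (l acc : List Char), l.length ≤ fuel →
      PySem.Chars.replace.go ['-'] ['_'] fuel l acc = acc.reverse ++ l.map pvPhi by
    simpa using h s.length s [] le_rfl
  intro fuel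
  induction fuel with
  | zero =>
    intro l acc h
    have : l = [] := List.length_eq_zero_iff.mp (by omega)
    subst this
    simp [PySem.Chars.replace.go]
  | succ n ih =>
    intro l acc h
    match l with
    | [] => simp [PySem.Chars.replace.go]
    | c :: t =>
      rw [PySem.Chars.replace.go]
      by_cases hp : (['-'] : List Char).isPrefixOf (c :: t) = true
      · have hc : c = '-' := by simp [List.isPrefixOf] at hp; exact hp.symm
        rw [if_pos hp]
        have hdrop : List.drop (['-'] : List Char).length (c :: t) = t := by simp
        rw [hdrop, ih t (['_'].reverse ++ acc) (by simp at h ⊢; omega)]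
        simp [pvPhi, hc]
      · have hc : c ≠ '-' := by simp [List.isPrefixOf] at hp; exact fun e => hp e.symm
        rw [if_neg hp]
        rw [ih t (c :: acc) (by simp at h ⊢; omega)]
        simp [pvPhi, hc]

-- structural model of split on a single-character separator
def pvMapHead (f : List Char → List Char) : List (List Char) → List (List Char)
  | [] => []
  | p :: ps => f p :: ps

def pvSplit1 (sep : Char) : List Char → List (List Char)
  | [] => [[]]
  | c :: t => if c = sep then [] :: pvSplit1 sep t else pvMapHead (c :: ·) (pvSplit1 sep t)

theorem pvSplit1_ne_nil (sep : Char) (s : List Char) : pvSplit1 sep s ≠ [] := by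
  induction s with
  | nil => simp [pvSplit1]
  | cons c t ih =>
    by_cases h : c = sep
    · simp [pvSplit1, h]
    · simp only [pvSplit1, if_neg h]
      match hm : pvSplit1 sep t with
      | [] => exact absurd hm ih
      | p :: ps => simp [pvMapHead]

theorem pvSplitOn_single (sep : Char) (s : List Char) :
    PySem.Chars.splitOn s [sep] = pvSplit1 sep s := by
  show PySem.Chars.splitOn.go [sep] (s.length + 1) s [] [] = _
  suffices h : ∀ fuel (l cur : List Char) (acc : List (List Char)), l.length + 1 ≤ fuel →
      PySem.Chars.splitOn.go [sep] fuel l cur acc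
        = acc.reverse ++ pvMapHead (cur.reverse ++ ·) (pvSplit1 sep l) by
    have hmh : ∀ l : List (List Char), pvMapHead (fun x => x) l = l := by
      intro l; cases l <;> simp [pvMapHead]
    simpa [hmh] using h (s.length + 1) s [] [] le_rfl
  intro fuel
  induction fuel with
  | zero => intro l cur acc h; omega
  | succ n ih =>
    intro l cur acc h
    match l with
    | [] => simp [PySem.Chars.splitOn.go, pvSplit1, pvMapHead]
    | c :: t =>
      rw [PySem.Chars.splitOn.go]
      by_cases hp : ([sep] : List Char).isPrefixOf (c :: t) = true
      · have hc : c = sep := by simp [List.isPrefixOf] at hp; exact hp.symm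
        rw [if_pos hp]
        have hdrop : List.drop ([sep] : List Char).length (c :: t) = t := by simp
        rw [hdrop, ih t [] (cur.reverse :: acc) (by simp at h ⊢; omega)]
        simp only [pvSplit1, if_pos hc, List.reverse_cons, List.reverse_nil,
          List.nil_append, List.append_assoc, List.cons_append]
        cases pvSplit1 sep t <;> simp [pvMapHead]
      · have hc : c ≠ sep := by simp [List.isPrefixOf] at hp; exact fun e => hp e.symm
        rw [if_neg hp]
        rw [ih t (c :: cur) acc (by simp at h ⊢; omega)]
        simp only [pvSplit1, if_neg hc]
        match hm : pvSplit1 sep t with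
        | [] => exact absurd hm (pvSplit1_ne_nil sep t)
        | p :: ps => simp [pvMapHead]

theorem pvSplit1_head (sep : Char) (s : List Char) :
    ∃ ps, pvSplit1 sep s = s.takeWhile (· ≠ sep) :: ps := by
  induction s with
  | nil => exact ⟨[], rfl⟩
  | cons c t ih =>
    by_cases h : c = sep
    · subst h
      exact ⟨pvSplit1 c t, by simp [pvSplit1, List.takeWhile]⟩
    · obtain ⟨ps, hps⟩ := ih
      refine ⟨ps, ?_⟩
      simp only [pvSplit1, if_neg h, hps, pvMapHead]
      simp [List.takeWhile, h]

theorem pvCap_nil : pvCap [] = [] := by decide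

theorem pvCap_cons (c : Char) (p : List Char) :
    pvCap (c :: p) = PySem.Chars.upperChar c :: p := by
  simp [pvCap, PySem.List.pyGet?, PySem.List.pyIdx?, PySem.Chars.upper,
    PySem.Chars.slice_eq_listSlice, PySem.List.slice_from_one]

theorem pvJoin_nil (l : List (List Char)) : PySem.Chars.join [] l = l.flatten := by
  induction l with
  | nil => simp [PySem.Chars.join_nil]
  | cons a t ih =>
    match t with
    | [] => simp [PySem.Chars.join_singleton]
    | b :: u =>
      rw [PySem.Chars.join_cons_cons] at *
      simp_all

theorem pvAltGo_takeWhile (s : List Char) (b : Bool) :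
    pvAltGo (s.takeWhile (· ≠ '.')) b = pvAltGo s b := by
  induction s generalizing b with
  | nil => rfl
  | cons c t ih =>
    simp only [ne_eq, decide_not] at ih ⊢
    by_cases h : c = '.'
    · subst h; simp [List.takeWhile, pvAltGo]
    · rw [List.takeWhile_cons_of_pos (by simp [h])]
      simp only [pvAltGo, if_neg h]
      split_ifs <;> simp [ih]

theorem pvAltGo_map (s : List Char) (b : Bool) :
    pvAltGo (s.map pvPhi) b = pvAltGo s b := by
  induction s generalizing b with
  | nil => rfl
  | cons c t ih =>
    by_cases hc : c = '-'
    · subst hc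
      simp [pvAltGo, pvPhi, ih]
    · have hphi : pvPhi c = c := by simp [pvPhi, hc]
      simp only [List.map_cons, hphi, pvAltGo]
      split_ifs <;> simp [ih]

theorem pvAltGo_r2 (s : List Char) (b : Bool) :
    pvAltGo (pvR2 s) b = pvAltGo s b := by
  fun_induction pvR2 s generalizing b with
  | case1 => rfl
  | case2 c => rfl
  | case3 c d t hc ih =>
    obtain ⟨rfl, rfl⟩ := hc
    simp [pvAltGo, ih]
  | case4 c d t hc ih =>
    have hhead : ∃ u, pvR2 (d :: t) = d :: u := by
      match t with
      | [] => exact ⟨[], rfl⟩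
      | e :: v =>
        by_cases h : d = '_' ∧ e = '_'
        · exact ⟨pvR2 v, by rw [show pvR2 (d :: e :: v) = if d = '_' ∧ e = '_' then '_' :: pvR2 v else d :: pvR2 (e :: v) from rfl, if_pos h, h.1]⟩
        · exact ⟨pvR2 (e :: v), by rw [show pvR2 (d :: e :: v) = if d = '_' ∧ e = '_' then '_' :: pvR2 v else d :: pvR2 (e :: v) from rfl, if_neg h]⟩
    obtain ⟨u, hu⟩ := hhead
    simp only [pvAltGo]
    split_ifs <;> simp_all [pvAltGo]

theorem pvAltGo_aWhile (s : List Char) (b : Bool) :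
    pvAltGo (pvAWhile s) b = pvAltGo s b := by
  fun_induction pvAWhile s with
  | case1 s h ih => rw [ih, pvR2_eq, pvAltGo_r2]
  | case2 s h => rfl

-- MAIN: A's split/capitalize/join equals B's single scan (on '.'-free input; '-' is
-- handled before this point on both sides)
theorem pvMain (s : List Char) (hdot : '.' ∉ s) (hdash : '-' ∉ s) :
    ((pvSplit1 '_' s).map pvCap).flatten = pvAltGo s true ∧
    (∀ p ps, pvSplit1 '_' s = p :: ps → pvAltGo s false = p ++ (ps.map pvCap).flatten) := by
  induction s with
  | nil =>
    refine ⟨by simp [pvSplit1, pvCap_nil, pvAltGo], ?_⟩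
    intro p ps h
    simp only [pvSplit1, List.cons.injEq] at h
    obtain ⟨rfl, rfl⟩ := h
    simp [pvAltGo]
  | cons c t ih =>
    have hdot' : '.' ∉ t := fun h => hdot (List.mem_cons_of_mem _ h)
    have hdash' : '-' ∉ t := fun h => hdash (List.mem_cons_of_mem _ h)
    obtain ⟨ihP, ihQ⟩ := ih hdot' hdash'
    have hcdot : c ≠ '.' := fun h => hdot (h ▸ List.mem_cons_self ..)
    obtain ⟨p, ps, hps⟩ : ∃ p ps, pvSplit1 '_' t = p :: ps := by
      match hm : pvSplit1 '_' t with
      | [] => exact absurd hm (pvSplit1_ne_nil _ t)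
      | p :: ps => exact ⟨p, ps, rfl⟩
    by_cases hc : c = '_'
    · subst hc
      have hsplit : pvSplit1 '_' ('_' :: t) = [] :: pvSplit1 '_' t := by
        simp [pvSplit1]
      have halt : ∀ b : Bool, pvAltGo ('_' :: t) b = pvAltGo t true := by
        intro b
        simp [pvAltGo]
      refine ⟨?_, ?_⟩
      · rw [hsplit, halt]
        simp [pvCap_nil, ihP]
      · intro q qs h
        rw [hsplit] at h
        obtain ⟨rfl, rfl⟩ := (List.cons.injEq ..).mp h
        rw [halt, ← ihP]
        exact (List.nil_append _).symm
    · have hcd : c ≠ '-' := fun h => hdash (h ▸ List.mem_cons_self ..)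
      have hsplit : pvSplit1 '_' (c :: t) = (c :: p) :: ps := by
        simp [pvSplit1, hc, hps, pvMapHead]
      have hstep : ∀ b : Bool, pvAltGo (c :: t) b =
          (if b then PySem.Chars.upperChar c :: pvAltGo t false else c :: pvAltGo t false) := by
        intro b
        simp only [pvAltGo, if_neg hcdot, if_neg (by tauto : ¬(c = '-' ∨ c = '_'))]
      refine ⟨?_, ?_⟩
      · rw [hsplit, hstep]
        simp only [List.map_cons, List.flatten_cons, pvCap_cons]
        rw [ihQ p ps hps]
        simp
      · intro q qs h
        rw [hsplit] at h
        obtain ⟨rfl, rfl⟩ := (List.cons.injEq ..).mp h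
        rw [hstep]
        simp only [if_neg (by simp : ¬(false = true))]
        rw [ihQ p ps hps]
        simp

theorem pvMem_r2 (s : List Char) (a : Char) : a ∈ pvR2 s → a ∈ s := by
  fun_induction pvR2 s with
  | case1 => exact fun h => h
  | case2 c => exact fun h => h
  | case3 c d t hc ih =>
    intro h
    obtain ⟨rfl, rfl⟩ := hc
    rcases List.mem_cons.mp h with rfl | h2
    · simp
    · exact List.mem_cons_of_mem _ (List.mem_cons_of_mem _ (ih h2))
  | case4 c d t hc ih =>
    intro h
    rcases List.mem_cons.mp h with rfl | h2
    · simp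
    · exact List.mem_cons_of_mem _ (ih h2)

theorem pvMem_aWhile (s : List Char) (a : Char) : a ∈ pvAWhile s → a ∈ s := by
  fun_induction pvAWhile s with
  | case1 s hf ih =>
    intro h
    have := ih h
    rw [pvR2_eq] at this
    exact pvMem_r2 s a this
  | case2 s hf => exact fun h => h

-- the string fed to pvMain below contains no '.' and no '-'
theorem pv_no_dot_aWhile (base : List Char) (h : '.' ∉ base) :
    '.' ∉ pvAWhile (base.map pvPhi) := by
  intro hmem
  have h1 := pvMem_aWhile _ _ hmem
  obtain ⟨c, hc, he⟩ := List.mem_map.mp h1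
  apply h
  have : c = '.' := by
    by_cases hcd : c = '-'
    · subst hcd; simp [pvPhi] at he
    · simpa [pvPhi, hcd] using he
  exact this ▸ hc

theorem pv_no_dash_aWhile (base : List Char) :
    '-' ∉ pvAWhile (base.map pvPhi) := by
  intro hmem
  have h1 := pvMem_aWhile _ _ hmem
  obtain ⟨c, _, he⟩ := List.mem_map.mp h1
  by_cases hcd : c = '-'
  · subst hcd; simp [pvPhi] at he
  · rw [show pvPhi c = c from by simp [pvPhi, hcd]] at he
    exact hcd he

-- ===== VERDICT (by name: the statement is the Claim_ definition above) =====
theorem basename_to_class_name_spec : Claim_equal_basename_to_class_name := by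
  intro name _ _
  unfold Spec_basename_to_class_name
  dsimp only [basename_to_class_name, basename_to_class_name_alt]
  congr 1
  set cs := name.toList with hcs
  obtain ⟨ps, hps⟩ := pvSplit1_head '.' cs
  have hbase : (PySem.List.pyGet? (PySem.Chars.splitOn cs ['.']) 0).getD []
      = cs.takeWhile (· ≠ '.') := by
    rw [pvSplitOn_single, hps]
    simp [PySem.List.pyGet?, PySem.List.pyIdx?]
  rw [hbase, pvRepl1_eq]
  set base := cs.takeWhile (· ≠ '.') with hb
  have hdotbase : '.' ∉ base := by
    intro h
    have := List.mem_takeWhile_imp h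
    simp at this
  have hdot : '.' ∉ pvAWhile (base.map pvPhi) := pv_no_dot_aWhile base hdotbase
  rw [pvSplitOn_single, pvJoin_nil, (pvMain _ hdot (pv_no_dash_aWhile base)).1,
    pvAltGo_aWhile, pvAltGo_map]
  exact pvAltGo_takeWhile cs true
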